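-- pv_equiv track=rewrite | github.com/AzraAkbas/CRM | Musteri_Iliskileri_Yonetimi.py | destek_yonlendirme
-- ===== SOURCE A (Python) =====
-- def destek_yonlendirme(musteri_talepleri, temsilciler):
--     """
--     Müşteri destek taleplerini şehir bazında uygun temsilcilere yönlendirir.
--
--     T(n) ve O(n) Hesapları:
--     -----------------------
--     - M: Müşteri sayısı
--     - N: Temsilci sayısı
--     - Filtreleme işlemi: O(N)
--     - Sıralama işlemi: O(N log N)
--     - İç döngüde uygun temsilci arama: O(N)
--     - remove() işlemi en kötü durumda O(N)
--     - Toplam: O(M (N log N))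
--
--     En kötü durumda tüm müşteriler için temsilcileri kontrol ettiğimizden **O(MN log N)** zaman karmaşıklığına sahiptir.
--     """
--
--     eslesmeler = []
--
--     for musteri_id, talep, musteri_sehir in musteri_talepleri:  # O(M)
--         # 1. Şehir bazında temsilcileri filtrele (O(N))
--         uygun_temsilciler = [t for t in temsilciler if t[2] == musteri_sehir]
--
--         # 2. Temsilcileri uygunluk skoruna göre büyükten küçüğe sırala (O(N log N))
--         uygun_temsilciler.sort(key=lambda x: x[1], reverse=True)
--
--         for i, (temsilci_id, uygunluk, temsilci_sehir) in enumerate(uygun_temsilciler):  # O(N)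
--             if uygunluk >= talep:
--                 eslesmeler.append((musteri_id, temsilci_id, musteri_sehir))
--
--                 # 3. Atanan temsilciyi listeden kaldır (O(N))
--                 temsilciler.remove((temsilci_id, uygunluk, temsilci_sehir))
--                 break
--
--     return eslesmeler  # Toplam: O(MN log N)
-- ===== SOURCE B (Python) =====
-- def destek_yonlendirme(musteri_talepleri, temsilciler):
--     # One combined select-and-remove pass per customer: an enumerate scan finds
--     # the position of the first highest-suitability rep in the right city that
--     # meets the demand, and slicing drops it -- no per-customer filter, no sort,
--     # no list.remove.  Unlike A, B does NOT mutate `temsilciler` in place; the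
--     # equivalence claimed is about the return value only.
--     kalan = temsilciler
--     eslesmeler = []
--     for musteri_id, talep, sehir in musteri_talepleri:
--         sec = None
--         for i, t in enumerate(kalan):
--             if t[2] == sehir and t[1] >= talep and (sec is None or sec[1][1] < t[1]):
--                 sec = (i, t)
--         if sec is not None:
--             eslesmeler.append((musteri_id, sec[1][0], sehir))
--             kalan = kalan[:sec[0]] + kalan[sec[0] + 1:]
--     return eslesmeler
-- ===== Notes on version B (the rewrite author's own statement) =====
-- stated objective: alternative
-- what changed: Per customer, A builds a city-filtered copy, stable-sorts it by suitability descending and scans it for the first rep meeting the demand, then removes it by value; B replaces filter+sort+scan+remove by a single enumerate pass that records the position of the first highest-suitability qualifying rep and slices that position out of the working list (which is never mutated in place).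
import Mathlib
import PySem

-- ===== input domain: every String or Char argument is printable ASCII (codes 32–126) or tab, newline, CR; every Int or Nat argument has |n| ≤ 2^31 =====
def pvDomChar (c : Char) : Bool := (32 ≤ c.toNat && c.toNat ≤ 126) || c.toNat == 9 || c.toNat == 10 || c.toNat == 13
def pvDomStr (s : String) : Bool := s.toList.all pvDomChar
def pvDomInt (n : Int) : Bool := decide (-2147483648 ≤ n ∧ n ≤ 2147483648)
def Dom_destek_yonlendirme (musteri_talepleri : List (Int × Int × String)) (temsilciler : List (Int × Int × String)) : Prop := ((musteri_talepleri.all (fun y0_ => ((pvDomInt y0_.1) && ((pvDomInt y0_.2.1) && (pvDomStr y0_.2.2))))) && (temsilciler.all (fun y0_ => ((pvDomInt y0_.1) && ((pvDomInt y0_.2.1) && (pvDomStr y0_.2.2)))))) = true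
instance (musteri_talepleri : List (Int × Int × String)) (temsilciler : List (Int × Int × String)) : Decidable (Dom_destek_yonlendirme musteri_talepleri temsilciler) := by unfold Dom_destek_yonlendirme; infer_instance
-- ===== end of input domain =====

-- B replaces A's per-customer filter + stable sort + scan + list.remove by ONE enumerate pass
-- that records the position of the pick, removed by slicing (objective: alternative — no sort).
-- A mutates `temsilciler` in place (list.remove); B does not; the theorems are about the return value.

-- ===== PORT A =====
-- inner `for … enumerate … break` loop of A: first rep in the list whose uygunluk >= talep
def pvScanA (talep : Int) : List (Int × Int × String) → Option (Int × Int × String)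
  | [] => none
  | t :: rest => if talep ≤ t.2.1 then some t else pvScanA talep rest

def destek_yonlendirme (musteri_talepleri : List (Int × Int × String)) (temsilciler : List (Int × Int × String)) : List (Int × Int × String) :=
  (musteri_talepleri.foldl (fun st m =>
      -- 1. filter reps by city, 2. stable sort by suitability descending
      let uygun := st.2.filter (fun t => t.2.2 == m.2.2)
      let uygunSirali := PySem.List.sorted uygun (fun t => t.2.1) true
      match pvScanA m.2.1 uygunSirali with
      | some t =>
          -- `temsilciler.remove(t)`: t comes from a filter of st.2, so it is present and remove? cannot fail
          (st.1 ++ [(m.1, t.1, m.2.2)], (PySem.List.remove? st.2 t).getD st.2)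
      | none => st)
    (([], temsilciler) : List (Int × Int × String) × List (Int × Int × String))).1

-- ===== PORT B =====
-- Source B's inner `for i, t in enumerate(kalan)` pass: the (position, rep) pick `sec`
def pvSecim (sehir : String) (talep : Int) (kalan : List (Int × Int × String)) :
    Option (Int × Int × Int × String) :=
  (PySem.List.enumerate kalan).foldl (fun sec it =>
    if (it.2.2.2 == sehir) && decide (talep ≤ it.2.2.1) &&
       (match sec with | none => true | some s => decide (s.2.2.1 < it.2.2.1))
    then some it else sec) none

def destek_yonlendirme_alt (musteri_talepleri : List (Int × Int × String)) (temsilciler : List (Int × Int × String)) : List (Int × Int × String) :=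
  (musteri_talepleri.foldl (fun st m =>
      match pvSecim m.2.2 m.2.1 st.2 with
      | some s =>
          -- `kalan = kalan[:sec[0]] + kalan[sec[0] + 1:]`
          (st.1 ++ [(m.1, s.2.1, m.2.2)],
           PySem.List.slice st.2 none (some s.1) ++ PySem.List.slice st.2 (some (s.1 + 1)) none)
      | none => st)
    (([], temsilciler) : List (Int × Int × String) × List (Int × Int × String))).1

-- ===== PRECONDITION & SPEC =====
def Spec_destek_yonlendirme (musteri_talepleri : List (Int × Int × String)) (temsilciler : List (Int × Int × String)) (out : List (Int × Int × String)) : Prop := out = destek_yonlendirme_alt musteri_talepleri temsilciler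
instance (musteri_talepleri : List (Int × Int × String)) (temsilciler : List (Int × Int × String)) (out : List (Int × Int × String)) : Decidable (Spec_destek_yonlendirme musteri_talepleri temsilciler out) := by unfold Spec_destek_yonlendirme; infer_instance

-- ===== CLAIM (what is proved, stated in full; the proofs are below) =====
def Claim_equal_destek_yonlendirme : Prop := ∀ (musteri_talepleri : List (Int × Int × String)) (temsilciler : List (Int × Int × String)), Dom_destek_yonlendirme musteri_talepleri temsilciler → Spec_destek_yonlendirme musteri_talepleri temsilciler (destek_yonlendirme musteri_talepleri temsilciler)

-- ===== LEMMAS AND PROOFS =====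

-- what A's scan of a suitability-descending list returns: the head if it qualifies, else nothing
def pvHeadSel (talep : Int) : List (Int × Int × String) → Option (Int × Int × String)
  | [] => none
  | h :: _ => if talep ≤ h.2.1 then some h else none

lemma pvScanA_eq_none (talep : Int) (l : List (Int × Int × String))
    (h : ∀ x ∈ l, x.2.1 < talep) : pvScanA talep l = none := by
  induction l with
  | nil => rfl
  | cons t rest ih =>
      have ht := h t (List.mem_cons_self ..)
      simp only [pvScanA, if_neg (by omega : ¬ talep ≤ t.2.1)]
      exact ih (fun x hx => h x (List.mem_cons_of_mem _ hx))

lemma pvScanA_eq_headSel (talep : Int) (l : List (Int × Int × String))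
    (h : l.Pairwise (fun a b => b.2.1 ≤ a.2.1)) : pvScanA talep l = pvHeadSel talep l := by
  cases l with
  | nil => rfl
  | cons t rest =>
      simp only [pvScanA, pvHeadSel]
      by_cases ht : talep ≤ t.2.1
      · simp [ht]
      · have hrest : ∀ x ∈ rest, x.2.1 < talep := by
          intro x hx
          have := (List.pairwise_cons.mp h).1 x hx
          omega
        simp [ht, pvScanA_eq_none talep rest hrest]

-- proof-side: the index-free best of the list (value of Source B's pick, forgetting the position)
def pvBest (sehir : String) (talep : Int) (temsilciler : List (Int × Int × String)) : Option (Int × Int × String) :=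
  temsilciler.foldl (fun best t =>
    if (t.2.2 == sehir) && decide (talep ≤ t.2.1) &&
       (match best with | none => true | some b => decide (b.2.1 < t.2.1))
    then some t else best) none

-- the fold invariant: the running best is exactly the qualifying head of A's insertion-sorted accumulator
lemma pv_fold_inv (sehir : String) (talep : Int) :
    ∀ (ts acc : List (Int × Int × String)) (best : Option (Int × Int × String)),
      best = pvHeadSel talep acc →
      ts.foldl (fun best t =>
          if (t.2.2 == sehir) && decide (talep ≤ t.2.1) &&
             (match best with | none => true | some b => decide (b.2.1 < t.2.1))
          then some t else best) best
        = pvHeadSel talep (ts.foldl (fun acc t =>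
            if t.2.2 == sehir then PySem.List.insertBy (fun a b => decide (b.2.1 < a.2.1)) t acc else acc) acc) := by
  intro ts
  induction ts with
  | nil => intro acc best h; simpa using h
  | cons t rest ih =>
      intro acc best h
      simp only [List.foldl_cons]
      apply ih
      by_cases hc : (t.2.2 == sehir) = true
      · simp only [hc, if_pos, Bool.true_and]
        cases acc with
        | nil =>
            subst h
            simp only [pvHeadSel, PySem.List.insertBy]
            by_cases ht : talep ≤ t.2.1 <;> simp [ht]
        | cons a as =>
            subst h
            simp only [pvHeadSel, PySem.List.insertBy]
            by_cases hlt : a.2.1 < t.2.1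
            · simp only [decide_eq_true_eq, if_pos hlt]
              by_cases ht : talep ≤ t.2.1
              · by_cases ha : talep ≤ a.2.1 <;> simp [ht, ha, hlt]
              · by_cases ha : talep ≤ a.2.1
                · omega
                · simp [ht, ha]
            · simp only [decide_eq_true_eq, if_neg hlt]
              by_cases ha : talep ≤ a.2.1
              · simp [ha, hlt]
              · have ht : ¬ talep ≤ t.2.1 := by omega
                simp [ha, ht]
      · simp only [Bool.not_eq_true] at hc
        simp [hc, h]

-- the index-free pass computes exactly what A's filter + stable descending sort + scan computes
lemma pvBest_eq_scanA (sehir : String) (talep : Int) (ts : List (Int × Int × String)) :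
    pvBest sehir talep ts
      = pvScanA talep (PySem.List.sorted (ts.filter (fun t => t.2.2 == sehir)) (fun t => t.2.1) true) := by
  rw [pvScanA_eq_headSel _ _ (PySem.List.sorted_pairwise_rev _ _),
      PySem.List.sorted_rev_eq_foldl_insertBy, List.foldl_filter]
  exact pv_fold_inv sehir talep ts [] none rfl

-- forgetting the position: Source B's pick projects to the index-free best
lemma pvSecim_map_snd (sehir : String) (talep : Int) :
    ∀ (ts : List (Int × Int × String)) (k : Int) (sec : Option (Int × Int × Int × String)),
      ts.foldl (fun best t =>
          if (t.2.2 == sehir) && decide (talep ≤ t.2.1) &&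
             (match best with | none => true | some b => decide (b.2.1 < t.2.1))
          then some t else best) (sec.map (·.2))
        = ((PySem.List.enumerate ts k).foldl (fun sec it =>
            if (it.2.2.2 == sehir) && decide (talep ≤ it.2.2.1) &&
               (match sec with | none => true | some s => decide (s.2.2.1 < it.2.2.1))
            then some it else sec) sec).map (·.2) := by
  intro ts
  induction ts with
  | nil => intro k sec; simp [PySem.List.enumerate_nil]
  | cons t rest ih =>
      intro k sec
      rw [PySem.List.enumerate_cons, List.foldl_cons, List.foldl_cons]
      have hstep :
          (if (t.2.2 == sehir) && decide (talep ≤ t.2.1) &&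
              (match sec.map (·.2) with | none => true | some b => decide (b.2.1 < t.2.1))
           then some t else sec.map (·.2))
            = ((if (((k, t) : Int × Int × Int × String).2.2.2 == sehir) && decide (talep ≤ ((k, t) : Int × Int × Int × String).2.2.1) &&
                  (match sec with | none => true | some s => decide (s.2.2.1 < ((k, t) : Int × Int × Int × String).2.2.1))
               then some ((k, t) : Int × Int × Int × String) else sec).map (·.2)) := by
        cases sec <;> dsimp only [Option.map] <;> split <;> rfl
      rw [hstep]
      exact ih (k + 1) _

-- the qualifying predicate of both inner loops
def pvQ (sehir : String) (talep : Int) (t : Int × Int × String) : Prop :=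
  t.2.2 = sehir ∧ talep ≤ t.2.1

-- Source B's pick-update condition, as a named function of the pick so far
def pvCond (sehir : String) (talep : Int) (sec : Option (Int × Int × Int × String))
    (t : Int × Int × String) : Bool :=
  (t.2.2 == sehir) && decide (talep ≤ t.2.1) &&
    (match sec with | none => true | some s => decide (s.2.2.1 < t.2.1))

-- the enumerate-fold invariant: what the running pick says about the scanned prefix
def pvInv (sehir : String) (talep : Int) (pre : List (Int × Int × String)) :
    Option (Int × Int × Int × String) → Prop
  | none => ∀ x ∈ pre, ¬ pvQ sehir talep x
  | some s => ∃ n : Nat, s.1 = (n : Int) ∧ ∃ hn : n < pre.length,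
      pre[n] = s.2 ∧ pvQ sehir talep s.2 ∧
      (∀ m (hm : m < n), ¬ (pvQ sehir talep (pre[m]'(by omega)) ∧ s.2.2.1 ≤ (pre[m]'(by omega)).2.1)) ∧
      (∀ x ∈ pre, pvQ sehir talep x → x.2.1 ≤ s.2.2.1)

-- one step of the enumerate fold preserves the invariant
lemma pv_inv_step (sehir : String) (talep : Int) (t : Int × Int × String)
    (pre : List (Int × Int × String)) (sec : Option (Int × Int × Int × String))
    (h : pvInv sehir talep pre sec) :
    pvInv sehir talep (pre ++ [t])
      (if pvCond sehir talep sec t then some ((pre.length : Int), t) else sec) := by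
  cases sec with
  | none =>
      by_cases hc : pvCond sehir talep none t = true
      · rw [if_pos hc]
        simp only [pvCond, Bool.and_true, Bool.and_eq_true, beq_iff_eq, decide_eq_true_eq] at hc
        have hQt : pvQ sehir talep t := ⟨hc.1, hc.2⟩
        refine ⟨pre.length, rfl, by simp, List.getElem_concat_length rfl _, hQt, ?_, ?_⟩
        · intro m hm hcon
          rw [List.getElem_append_left (by omega : m < pre.length)] at hcon
          exact h _ (List.getElem_mem _) hcon.1
        · intro x hx hQx
          rcases List.mem_append.mp hx with hx | hx
          · exact absurd hQx (h x hx)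
          · simp only [List.mem_singleton] at hx; subst hx
            exact le_refl _
      · rw [if_neg hc]
        simp only [pvCond, Bool.and_true, Bool.and_eq_true, beq_iff_eq, decide_eq_true_eq,
          not_and] at hc
        intro x hx
        rcases List.mem_append.mp hx with hx | hx
        · exact h x hx
        · simp only [List.mem_singleton] at hx; subst hx
          intro hQx
          exact absurd hQx.2 (hc hQx.1)
  | some s =>
      obtain ⟨n, hs1, hn, hget, hQ, hmin, hmax⟩ := h
      by_cases hc : pvCond sehir talep (some s) t = true
      · rw [if_pos hc]
        simp only [pvCond, Bool.and_eq_true, beq_iff_eq, decide_eq_true_eq] at hc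
        obtain ⟨⟨hcity, hdem⟩, hgt⟩ := hc
        refine ⟨pre.length, rfl, by simp, List.getElem_concat_length rfl _, ⟨hcity, hdem⟩, ?_, ?_⟩
        · intro m hm hcon
          rw [List.getElem_append_left (by omega : m < pre.length)] at hcon
          have h1 : t.2.1 ≤ (pre[m]'(by omega : m < pre.length)).2.1 := hcon.2
          have h2 := hmax _ (List.getElem_mem (by omega : m < pre.length)) hcon.1
          omega
        · intro x hx hQx
          rcases List.mem_append.mp hx with hx | hx
          · have := hmax x hx hQx
            show x.2.1 ≤ t.2.1
            omega
          · simp only [List.mem_singleton] at hx; subst hx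
            exact le_refl _
      · rw [if_neg hc]
        simp only [pvCond, Bool.and_eq_true, beq_iff_eq, decide_eq_true_eq, not_and] at hc
        refine ⟨n, hs1, by simp only [List.length_append, List.length_cons]; omega, ?_, hQ, ?_, ?_⟩
        · rw [List.getElem_append_left hn]
          exact hget
        · intro m hm hcon
          rw [List.getElem_append_left (by omega : m < pre.length)] at hcon
          exact hmin m hm hcon
        · intro x hx hQx
          rcases List.mem_append.mp hx with hx | hx
          · exact hmax x hx hQx
          · simp only [List.mem_singleton] at hx; subst hx
            have hnc := hc ⟨hQx.1, hQx.2⟩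
            omega

-- running Source B's enumerate pass from a pick that describes the scanned prefix
lemma pvSecim_inv (sehir : String) (talep : Int) :
    ∀ (ts pre : List (Int × Int × String)) (sec : Option (Int × Int × Int × String)),
      pvInv sehir talep pre sec →
      pvInv sehir talep (pre ++ ts)
        ((PySem.List.enumerate ts (pre.length : Int)).foldl (fun sec it =>
            if pvCond sehir talep sec it.2 then some it else sec) sec) := by
  intro ts
  induction ts with
  | nil => intro pre sec h; simpa [PySem.List.enumerate_nil] using h
  | cons t rest ih =>
      intro pre sec h
      rw [PySem.List.enumerate_cons, List.foldl_cons]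
      have hlen : (pre.length : Int) + 1 = ((pre ++ [t]).length : Int) := by
        simp [List.length_append]
      have hassoc : pre ++ t :: rest = (pre ++ [t]) ++ rest := by simp
      rw [hassoc, hlen]
      exact ih (pre ++ [t]) _ (pv_inv_step sehir talep t pre sec h)

-- removing the first occurrence, spelled with take/drop
lemma pv_remove_eq_slices (ts : List (Int × Int × String)) (t : Int × Int × String) (n : Nat)
    (hn : n < ts.length) (hget : ts[n] = t) (hfirst : ∀ m (hm : m < n), ts[m]'(by omega) ≠ t) :
    PySem.List.remove? ts t = some (ts.take n ++ ts.drop (n + 1)) := by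
  induction ts generalizing n with
  | nil => simp at hn
  | cons x rest ih =>
      cases n with
      | zero =>
          simp only [List.getElem_cons_zero] at hget
          subst hget
          simp [PySem.List.remove?_cons_self]
      | succ n =>
          have hx : x ≠ t := hfirst 0 (Nat.succ_pos n)
          rw [PySem.List.remove?_cons_of_ne rest hx,
              ih n (by simpa using hn) (by simpa using hget)
                (fun m hm => by simpa using hfirst (m + 1) (by omega))]
          simp

-- the two per-customer step functions agree
lemma pv_step_eq (m : Int × Int × String) (st : List (Int × Int × String) × List (Int × Int × String)) :
    (let uygun := st.2.filter (fun t => t.2.2 == m.2.2)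
     let uygunSirali := PySem.List.sorted uygun (fun t => t.2.1) true
     match pvScanA m.2.1 uygunSirali with
     | some t => (st.1 ++ [(m.1, t.1, m.2.2)], (PySem.List.remove? st.2 t).getD st.2)
     | none => st)
    = (match pvSecim m.2.2 m.2.1 st.2 with
       | some s => (st.1 ++ [(m.1, s.2.1, m.2.2)],
           PySem.List.slice st.2 none (some s.1) ++ PySem.List.slice st.2 (some (s.1 + 1)) none)
       | none => st) := by
  have hproj : pvBest m.2.2 m.2.1 st.2 = (pvSecim m.2.2 m.2.1 st.2).map (·.2) :=
    pvSecim_map_snd m.2.2 m.2.1 st.2 0 none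
  have hscan : pvScanA m.2.1
      (PySem.List.sorted (st.2.filter (fun t => t.2.2 == m.2.2)) (fun t => t.2.1) true)
      = (pvSecim m.2.2 m.2.1 st.2).map (·.2) := by
    rw [← pvBest_eq_scanA]; exact hproj
  have hinv : pvInv m.2.2 m.2.1 st.2 (pvSecim m.2.2 m.2.1 st.2) :=
    pvSecim_inv m.2.2 m.2.1 st.2 [] none (by intro x hx; simp at hx)
  dsimp only
  rw [hscan]
  cases hsec : pvSecim m.2.2 m.2.1 st.2 with
  | none => rfl
  | some s =>
      rw [hsec] at hinv
      obtain ⟨n, hs1, hn, hget, hQ, hmin, hmax⟩ := hinv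
      have hfirst : ∀ p (hp : p < n), (st.2[p]'(by omega)) ≠ s.2 := by
        intro p hp heq
        exact hmin p hp (by rw [heq]; exact ⟨hQ, le_refl _⟩)
      have hrem : PySem.List.remove? st.2 s.2 = some (st.2.take n ++ st.2.drop (n + 1)) :=
        pv_remove_eq_slices st.2 s.2 n hn hget hfirst
      have hsl1 : PySem.List.slice st.2 none (some s.1) = st.2.take n := by
        rw [hs1, PySem.List.slice_to_natCast]
      have hsl2 : PySem.List.slice st.2 (some (s.1 + 1)) none = st.2.drop (n + 1) := by
        have h1 : s.1 + 1 = ((n + 1 : Nat) : Int) := by rw [hs1]; push_cast; ring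
        rw [h1, PySem.List.slice_from_natCast]
      simp [hrem, hsl1, hsl2]

-- ===== VERDICT (by name: the statement is the Claim_ definition above) =====
theorem destek_yonlendirme_spec : Claim_equal_destek_yonlendirme := by
  intro mt ts _
  unfold Spec_destek_yonlendirme destek_yonlendirme destek_yonlendirme_alt
  congr 1
  congr 1
  funext st m
  exact pv_step_eq m st
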